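-- pv_equiv track=rewrite | github.com/1r0nw1ll/quantum-arithmetic-research | qa_episode_regime_cert_v1/validator.py | _recompute_regime_and_counts
-- ===== SOURCE A (Python) =====
-- from typing import Any, Dict, List, Optional, Tuple
--
-- ESCALATION_CLASS = {"MONOTONE_ESCALATION"}
--
-- RECOVERY_CLASS   = {"MONOTONE_RECOVERY", "RETURN_TO_REF"}
--
-- def _regime_for_label(label: str) -> str:
--     if label in ESCALATION_CLASS:
--         return "ESCALATION"
--     if label in RECOVERY_CLASS:
--         return "RECOVERY"
--     return "NEUTRAL"
--
-- def _recompute_regime_and_counts(labels: List[str]) -> Tuple[List[str], int, int, int]: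
--     """Return (regime_sequence, escalation_count, recovery_count, neutral_count)."""
--     regime_seq: List[str] = []
--     esc = rec = neu = 0
--     for lbl in labels:
--         r = _regime_for_label(lbl)
--         regime_seq.append(r)
--         if r == "ESCALATION":
--             esc += 1
--         elif r == "RECOVERY":
--             rec += 1
--         else:
--             neu += 1
--     return regime_seq, esc, rec, neu
-- ===== SOURCE B (Python) =====
-- from typing import List, Tuple
--
-- ESCALATION_CLASS = {"MONOTONE_ESCALATION"}
-- RECOVERY_CLASS   = {"MONOTONE_RECOVERY", "RETURN_TO_REF"}
--
-- def _regime_for_label(label: str) -> str: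
--     if label in ESCALATION_CLASS:
--         return "ESCALATION"
--     if label in RECOVERY_CLASS:
--         return "RECOVERY"
--     return "NEUTRAL"
--
-- def _recompute_regime_and_counts(labels: List[str]) -> Tuple[List[str], int, int, int]:
--     """Aggregate a label-frequency table once, derive the counts from it
--     (escalation/recovery by summing frequencies of the class members,
--     neutral as the arithmetic complement), and build the regime sequence
--     by a separate map.  The classifier is never used for the tally."""
--     freq = {}
--     for lbl in labels:
--         freq[lbl] = freq.get(lbl, 0) + 1
--     esc = sum(c for l, c in freq.items() if l in ESCALATION_CLASS)
--     rec = sum(c for l, c in freq.items() if l in RECOVERY_CLASS)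
--     neu = len(labels) - esc - rec
--     regime_seq = [_regime_for_label(lbl) for lbl in labels]
--     return regime_seq, esc, rec, neu
-- ===== Notes on version B (the rewrite author's own statement) =====
-- stated objective: alternative
-- what changed: Replaces A's fused classify-append-increment loop by hash aggregation: build a label-frequency dict once, derive escalation/recovery counts by summing frequencies of distinct labels in each class set, obtain neutral as len(labels)-esc-rec (never scanned), and build the regime sequence by a separate map; the classifier is not used for the tally at all.
import Mathlib
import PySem

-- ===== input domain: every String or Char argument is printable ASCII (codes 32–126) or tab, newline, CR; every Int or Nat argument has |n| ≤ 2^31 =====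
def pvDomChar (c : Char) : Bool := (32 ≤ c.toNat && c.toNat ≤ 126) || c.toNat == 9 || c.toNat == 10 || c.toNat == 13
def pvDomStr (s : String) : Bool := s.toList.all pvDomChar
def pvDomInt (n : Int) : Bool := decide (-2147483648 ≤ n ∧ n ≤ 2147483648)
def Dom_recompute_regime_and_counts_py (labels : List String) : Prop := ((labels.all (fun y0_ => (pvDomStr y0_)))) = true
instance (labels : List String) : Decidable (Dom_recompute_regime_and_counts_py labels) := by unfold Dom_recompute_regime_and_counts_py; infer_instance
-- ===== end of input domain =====

-- B replaces A's fused classify-and-increment loop by hash aggregation: a label-frequency dict, class counts summed from it, neutral by arithmetic complement; same cost.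


-- ===== PORT A =====
def escalation_class_py : PySem.Set String := PySem.Set.ofList ["MONOTONE_ESCALATION"]
def recovery_class_py : PySem.Set String := PySem.Set.ofList ["MONOTONE_RECOVERY", "RETURN_TO_REF"]

def regime_for_label_py (label : String) : String :=
  if escalation_class_py.contains label then "ESCALATION"
  else if recovery_class_py.contains label then "RECOVERY"
  else "NEUTRAL"

def step_py (st : List String × Int × Int × Int) (lbl : String) : List String × Int × Int × Int :=
  let r := regime_for_label_py lbl
  let seq := st.1 ++ [r]
  if r == "ESCALATION" then (seq, st.2.1 + 1, st.2.2.1, st.2.2.2)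
  else if r == "RECOVERY" then (seq, st.2.1, st.2.2.1 + 1, st.2.2.2)
  else (seq, st.2.1, st.2.2.1, st.2.2.2 + 1)

def recompute_regime_and_counts_py (labels : List String) : List String × Int × Int × Int :=
  labels.foldl step_py ([], 0, 0, 0)

-- ===== PORT B =====
def recompute_regime_and_counts_py_alt (labels : List String) : List String × Int × Int × Int :=
  let freq : PySem.Dict String Int :=
    labels.foldl (fun d l => d.insert l (d.getD l 0 + 1)) PySem.Dict.empty
  let esc := ((freq.items.filter (fun p => escalation_class_py.contains p.1)).map (·.2)).sum
  let rec_ := ((freq.items.filter (fun p => recovery_class_py.contains p.1)).map (·.2)).sum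
  let neu := (labels.length : Int) - esc - rec_
  (labels.map regime_for_label_py, esc, rec_, neu)

-- ===== PRECONDITION & SPEC =====
def Spec_recompute_regime_and_counts_py (labels : List String) (out : List String × Int × Int × Int) : Prop := out = recompute_regime_and_counts_py_alt labels
instance (labels : List String) (out : List String × Int × Int × Int) : Decidable (Spec_recompute_regime_and_counts_py labels out) := by unfold Spec_recompute_regime_and_counts_py; infer_instance

-- ===== CLAIM =====
def Claim_equal_recompute_regime_and_counts_py : Prop := ∀ (labels : List String), Dom_recompute_regime_and_counts_py labels → Spec_recompute_regime_and_counts_py labels (recompute_regime_and_counts_py labels)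

-- ===== LEMMAS AND PROOFS =====
lemma esc_eq : escalation_class_py = ["MONOTONE_ESCALATION"] := by decide

lemma rec_eq : recovery_class_py = ["MONOTONE_RECOVERY", "RETURN_TO_REF"] := by decide

lemma disj (l : String) (h : l ∈ recovery_class_py) : l ∉ escalation_class_py := by
  rw [rec_eq] at h; rw [esc_eq]
  simp only [List.mem_cons, List.not_mem_nil, or_false] at h ⊢
  rcases h with h | h <;> subst h <;> decide

-- B's class sums over the frequency table equal countP over the raw labels
lemma sum_freq_filter (q : String → Bool) (labels : List String) :
    ((((PySem.Dict.counter labels).items.filter (fun p => q p.1)).map (·.2)).sum : Int)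
      = (labels.countP q : Int) := by
  rw [PySem.Dict.items_counter, List.filter_map, List.map_map]
  have hperm : (PySem.Set.ofList labels).Perm labels.dedup := by
    apply (List.perm_ext_iff_of_nodup (PySem.Set.nodup_ofList _) labels.nodup_dedup).2
    intro x; rw [PySem.Set.mem_ofList, List.mem_dedup]
  have hperm2 := (hperm.filter fun k => q k).map (fun k => ((labels.count k : Nat) : Int))
  have hcast : ∀ (l : List String),
      ((l.filter fun k => q k).map (fun k => ((labels.count k : Nat) : Int))).sum
        = (((l.filter fun k => q k).map (fun k => labels.count k)).sum : Int) := by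
    intro l; induction (l.filter fun k => q k) with
    | nil => simp
    | cons x t ih => simp [ih]
  calc (((PySem.Set.ofList labels).filter fun p => q ((fun k => (k, (labels.count k : Int))) p).1).map
          ((·.2) ∘ fun k => (k, (labels.count k : Int)))).sum
      = ((labels.dedup.filter fun k => q k).map (fun k => ((labels.count k : Nat) : Int))).sum := by
        simpa [Function.comp] using hperm2.sum_eq
    _ = (((labels.dedup.filter fun k => q k).map (fun k => labels.count k)).sum : Int) := hcast _
    _ = (labels.countP q : Int) := by
        rw [List.sum_map_count_dedup_filter_eq_countP q labels]

lemma loop_invariant (labels : List String) (seq : List String) (e r n : Int) :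
    labels.foldl step_py (seq, e, r, n) =
    (seq ++ labels.map regime_for_label_py,
     e + (labels.countP (fun l => decide (l ∈ escalation_class_py)) : Int),
     r + (labels.countP (fun l => decide (l ∈ recovery_class_py)) : Int),
     n + (labels.countP (fun l => !decide (l ∈ escalation_class_py) &&
            !decide (l ∈ recovery_class_py)) : Int)) := by
  induction labels generalizing seq e r n with
  | nil => simp
  | cons x l ih =>
    simp only [List.foldl_cons, step_py]
    by_cases hE : x ∈ escalation_class_py
    · have h2 : x ∉ recovery_class_py := fun hr => disj x hr hE
      have hreg : regime_for_label_py x = "ESCALATION" := by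
        simp [regime_for_label_py, hE]
      simp [hreg, ih, hE, h2]
      omega
    · have hreg : regime_for_label_py x = if x ∈ recovery_class_py then "RECOVERY" else "NEUTRAL" := by
        simp [regime_for_label_py, hE]
      by_cases hR : x ∈ recovery_class_py
      · simp [hreg, ih, hE, hR]
        omega
      · simp [hreg, ih, hE, hR]
        omega

lemma countP_partition (labels : List String) :
    (labels.countP (fun l => !decide (l ∈ escalation_class_py) &&
        !decide (l ∈ recovery_class_py)) : Int)
      = (labels.length : Int)
        - (labels.countP (fun l => decide (l ∈ escalation_class_py)) : Int)
        - (labels.countP (fun l => decide (l ∈ recovery_class_py)) : Int) := by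
  induction labels with
  | nil => simp
  | cons x l ih =>
    simp only [List.countP_cons, List.length_cons]
    by_cases hE : x ∈ escalation_class_py
    · have h2 : x ∉ recovery_class_py := fun hr => disj x hr hE
      simp [hE, h2]; omega
    · by_cases hR : x ∈ recovery_class_py
      · simp [hE, hR]; omega
      · simp [hE, hR]; omega

-- ===== VERDICT =====
theorem recompute_regime_and_counts_py_spec : Claim_equal_recompute_regime_and_counts_py := by
  intro labels _
  unfold Spec_recompute_regime_and_counts_py recompute_regime_and_counts_py
  rw [loop_invariant]
  simp [recompute_regime_and_counts_py_alt,
        PySem.Dict.foldl_insert_getD_add_one_eq_counter, countP_partition]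
  have h1 := sum_freq_filter (fun l => decide (l ∈ escalation_class_py)) labels
  have h2 := sum_freq_filter (fun l => decide (l ∈ recovery_class_py)) labels
  exact ⟨h1.symm, h2.symm, by rw [h1, h2]⟩
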